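-- pv_equiv track=rewrite | github.com/cpdd29/XXL | backend/app/services/message_ingestion_service.py | _memory_context_lines
-- ===== SOURCE A (Python) =====
-- MEMORY_CONTEXT_LIMIT_MIN = 5
--
-- MEMORY_CONTEXT_LIMIT_MAX = 10
--
-- MEMORY_INJECTION_TYPE_WHITELIST = {
--     "session_summary",
--     "preferences",
--     "decisions",
--     "task_result",
--     "event",
-- }
--
-- def _memory_context_lines(memory_items: list[dict]) -> list[str]:
--     filtered_items, _ = _filter_memory_items_for_injection(memory_items)
--     limit = _dynamic_memory_window(
--         memory_items=filtered_items,
--         min_limit=MEMORY_CONTEXT_LIMIT_MIN,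
--         max_limit=MEMORY_CONTEXT_LIMIT_MAX,
--     )
--     return [
--         f"记忆注入: {str(item.get('memory_text') or '').strip()}"
--         for item in filtered_items[:limit]
--         if str(item.get("memory_text") or "").strip()
--     ]
--
-- def _filter_memory_items_for_injection(memory_items: list[dict]) -> tuple[list[dict], list[dict]]:
--     allowed: list[dict] = []
--     blocked: list[dict] = []
--     for item in memory_items:
--         memory_type = str(item.get("memory_type") or "session_summary").strip().lower()
--         if memory_type in MEMORY_INJECTION_TYPE_WHITELIST:
--             allowed.append(item)
--         else:
--             blocked.append(item)
--     return allowed, blocked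
--
-- def _dynamic_memory_window(
--     *,
--     memory_items: list[dict],
--     min_limit: int,
--     max_limit: int,
-- ) -> int:
--     if not memory_items:
--         return 0
--     normalized_min = max(1, int(min_limit))
--     normalized_max = max(normalized_min, int(max_limit))
--     return min(len(memory_items), max(normalized_min, min(normalized_max, len(memory_items))))
-- ===== SOURCE B (Python) =====
-- _ALLOWED_TYPES = ("session_summary", "preferences", "decisions", "task_result", "event")
--
--
-- def _memory_context_lines(memory_items: list[dict]) -> list[str]:
--     # Single pass: count allowed items (cap 10, since the min_limit=5 clamp in A is
--     # algebraically dead) and emit a line for each allowed item with non-empty text.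
--     lines: list[str] = []
--     seen = 0
--     for item in memory_items:
--         memory_type = str(item.get("memory_type") or "session_summary").strip().lower()
--         if memory_type not in _ALLOWED_TYPES:
--             continue
--         seen += 1
--         if seen > 10:
--             break
--         text = str(item.get("memory_text") or "").strip()
--         if text:
--             lines.append(f"记忆注入: {text}")
--     return lines
-- ===== Notes on version B (the rewrite author's own statement) =====
-- stated objective: simpler
-- what changed: Replaced the three-helper pipeline (filter into allowed/blocked lists, compute a dynamic window whose min_limit=5 clamp is dead, slice, then a guarded comprehension) with one fused pass that counts allowed items, breaks after 10, and appends a line when the stripped text is non-empty.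
import Mathlib
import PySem

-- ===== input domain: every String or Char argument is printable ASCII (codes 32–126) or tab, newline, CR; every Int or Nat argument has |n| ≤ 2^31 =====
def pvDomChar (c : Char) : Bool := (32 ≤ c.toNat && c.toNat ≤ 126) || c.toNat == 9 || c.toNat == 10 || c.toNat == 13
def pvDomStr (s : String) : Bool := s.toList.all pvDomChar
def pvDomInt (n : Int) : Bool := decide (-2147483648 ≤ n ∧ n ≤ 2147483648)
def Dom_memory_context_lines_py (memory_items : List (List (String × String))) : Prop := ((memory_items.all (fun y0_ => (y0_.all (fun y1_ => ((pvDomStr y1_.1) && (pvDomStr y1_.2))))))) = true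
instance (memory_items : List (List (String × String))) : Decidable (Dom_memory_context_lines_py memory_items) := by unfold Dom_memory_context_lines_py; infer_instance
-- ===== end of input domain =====

-- B inlines the three helpers into one counted pass over memory_items (simpler decomposition, same O(n) cost).

-- shared helpers: the Python expressions both versions evaluate verbatim on an item
-- `str(x or d)` on an optional string value (None or "" falls back to d)
def pvOrDefault (s : Option String) (d : String) : String :=
  match s with
  | none => d
  | some t => if t == "" then d else t

def pvWhitelist : List String :=
  ["session_summary", "preferences", "decisions", "task_result", "event"]

-- str(item.get("memory_type") or "session_summary").strip().lower()
def pvMemoryType (item : List (String × String)) : String :=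
  PySem.Str.lower (PySem.Str.strip (pvOrDefault ((PySem.Dict.mk item).get? "memory_type") "session_summary"))

-- str(item.get("memory_text") or "").strip()
def pvMemoryText (item : List (String × String)) : String :=
  PySem.Str.strip (pvOrDefault ((PySem.Dict.mk item).get? "memory_text") "")

-- ===== PORT A =====
def pvFilterStep (ab : List (List (String × String)) × List (List (String × String)))
    (item : List (String × String)) :
    List (List (String × String)) × List (List (String × String)) :=
  if pvWhitelist.contains (pvMemoryType item) then (ab.1 ++ [item], ab.2) else (ab.1, ab.2 ++ [item])

def pvFilterMemoryItemsForInjection (memory_items : List (List (String × String))) :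
    List (List (String × String)) × List (List (String × String)) :=
  memory_items.foldl pvFilterStep ([], [])

def pvDynamicMemoryWindow (memory_items : List (List (String × String)))
    (min_limit max_limit : Int) : Int :=
  if memory_items.isEmpty then 0
  else
    let normalizedMin := max 1 min_limit
    let normalizedMax := max normalizedMin max_limit
    min (memory_items.length : Int) (max normalizedMin (min normalizedMax (memory_items.length : Int)))

def memory_context_lines_py (memory_items : List (List (String × String))) : List String :=
  let filtered := (pvFilterMemoryItemsForInjection memory_items).1
  let limit := pvDynamicMemoryWindow filtered 5 10
  ((PySem.List.slice filtered none (some limit)).filter (fun item => pvMemoryText item != "")).map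
    (fun item => "记忆注入: " ++ pvMemoryText item)

-- ===== PORT B =====
def pvCollect : List (List (String × String)) → Nat → List String
  | [], _ => []
  | item :: rest, seen =>
    if pvWhitelist.contains (pvMemoryType item) then
      if 10 < seen + 1 then []
      else
        let text := pvMemoryText item
        if text == "" then pvCollect rest (seen + 1)
        else ("记忆注入: " ++ text) :: pvCollect rest (seen + 1)
    else pvCollect rest seen

def memory_context_lines_py_alt (memory_items : List (List (String × String))) : List String :=
  pvCollect memory_items 0

-- ===== PRECONDITION & SPEC =====
def Spec_memory_context_lines_py (memory_items : List (List (String × String))) (out : List String) : Prop := out = memory_context_lines_py_alt memory_items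
instance (memory_items : List (List (String × String))) (out : List String) : Decidable (Spec_memory_context_lines_py memory_items out) := by unfold Spec_memory_context_lines_py; infer_instance

-- ===== CLAIM (what is proved, stated in full; the proofs are below) =====
def Claim_equal_memory_context_lines_py : Prop := ∀ (memory_items : List (List (String × String))), Dom_memory_context_lines_py memory_items → Spec_memory_context_lines_py memory_items (memory_context_lines_py memory_items)

-- ===== LEMMAS AND PROOFS =====

-- the first component of A's filter loop is a List.filter
theorem pvFilter_fst (l : List (List (String × String)))
    (a b : List (List (String × String))) :
    (l.foldl pvFilterStep (a, b)).1 = a ++ l.filter (fun item => pvWhitelist.contains (pvMemoryType item)) := by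
  induction l generalizing a b with
  | nil => simp
  | cons x xs ih =>
    simp only [List.foldl_cons, List.filter_cons, pvFilterStep]
    by_cases h : pvMemoryType x ∈ pvWhitelist
    · simp [h, ih]
    · simp [h, ih]

theorem pvTake_min_length {α : Type} (xs : List α) (n : Nat) :
    xs.take (min xs.length n) = xs.take n := by
  rcases Nat.le_total xs.length n with h | h
  · rw [Nat.min_eq_left h, List.take_length, List.take_of_length_le h]
  · rw [Nat.min_eq_right h]

-- A's slice of the filtered list by the dynamic window is just `take 10`
theorem pvSlice_window (F : List (List (String × String))) :
    PySem.List.slice F none (some (pvDynamicMemoryWindow F 5 10)) = F.take 10 := by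
  unfold pvDynamicMemoryWindow
  by_cases hF : F.isEmpty
  · rw [if_pos hF, PySem.List.slice_to F (by omega)]
    rw [List.isEmpty_iff] at hF
    simp [hF]
  · have h0 : (0:Int) ≤ min (F.length : Int) (max (max 1 5) (min (max (max 1 5) 10) (F.length : Int))) := by omega
    have hT : (min (F.length : Int) (max (max 1 5) (min (max (max 1 5) 10) (F.length : Int)))).toNat
        = min F.length 10 := by omega
    simp only [if_neg hF, PySem.List.slice_to F h0, hT, pvTake_min_length]

-- B's counted pass equals: take the first (10 - seen) allowed items, drop empty texts, format
theorem pvCollect_eq (l : List (List (String × String))) (seen : Nat) (hs : seen ≤ 10) :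
    pvCollect l seen =
      (((l.filter (fun item => pvWhitelist.contains (pvMemoryType item))).take (10 - seen)).filter
        (fun item => pvMemoryText item != "")).map (fun item => "记忆注入: " ++ pvMemoryText item) := by
  induction l generalizing seen with
  | nil => simp [pvCollect]
  | cons x xs ih =>
    simp only [pvCollect, List.filter_cons]
    by_cases hw : pvWhitelist.contains (pvMemoryType x)
    · simp only [hw, if_true]
      by_cases hcap : 10 < seen + 1
      · have : 10 - seen = 0 := by omega
        simp [hcap, this]
      · have hlt : seen < 10 := by omega
        have htake : 10 - seen = (10 - (seen + 1)) + 1 := by omega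
        rw [htake]
        simp only [hcap, if_false, List.take_succ_cons, List.filter_cons]
        by_cases ht : pvMemoryText x == ""
        · have : (pvMemoryText x != "") = false := by simp_all
          simp only [ht, this, if_neg Bool.false_ne_true]
          exact ih (seen + 1) (by omega)
        · have hne : (pvMemoryText x != "") = true := by simp_all
          simp only [ht, hne]
          rw [ih (seen + 1) (by omega)]
          simp
    · simp only [hw]
      exact ih seen hs

-- ===== VERDICT (by name: the statement is the Claim_ definition above) =====
theorem memory_context_lines_py_spec : Claim_equal_memory_context_lines_py := by
  intro memory_items _
  unfold Spec_memory_context_lines_py memory_context_lines_py_alt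
  simp only [memory_context_lines_py, pvFilterMemoryItemsForInjection]
  rw [pvFilter_fst, List.nil_append, pvSlice_window, pvCollect_eq memory_items 0 (by omega)]
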